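-- pv_equiv track=rewrite | github.com/eshat69/99DaysWithCPC | day19/icpc/yfg3.py | solve_diy
-- ===== SOURCE A (Python) =====
-- from collections import Counter
--
-- def solve_diy(test_cases):
--     results = []
--     for n, arr in test_cases:
--         count = Counter(arr)
--         candidates = []
--         for num, freq in count.items():
--             if freq >= 2:
--                 candidates.append(num)
--         candidates.sort()
--
--         if len(candidates) < 2:
--             results.append("NO")
--         else:
--             x1 = candidates[0]
--             x2 = candidates[-1]
--             results.append("YES")
--             results.append(f"{x1} {x1} {x1} {x2} {x2} {x1} {x2} {x2}")
--
--     return results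
-- ===== SOURCE B (Python) =====
-- def solve_diy(test_cases):
--     results = []
--     for n, arr in test_cases:
--         seen = set()
--         dup = set()
--         lo = hi = None
--         for v in arr:
--             if v in seen:
--                 if v not in dup:
--                     dup.add(v)
--                     if lo is None or v < lo:
--                         lo = v
--                     if hi is None or v > hi:
--                         hi = v
--             else:
--                 seen.add(v)
--         if len(dup) < 2:
--             results.append("NO")
--         else:
--             results.append("YES")
--             results.append(f"{lo} {lo} {lo} {hi} {hi} {lo} {hi} {hi}")
--     return results
-- ===== Notes on version B (the rewrite author's own statement) =====
-- stated objective: alternative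
-- what changed: Per test case, B replaces A's Counter dict + candidate-list filter + sort by a single linear pass over the array that tracks seen/duplicated sets and the running min and max of the duplicated values, so no sorted candidate list is ever built; it avoids the sort but trades C-level Counter work for an explicit loop, so it is not measurably faster.
import Mathlib
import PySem

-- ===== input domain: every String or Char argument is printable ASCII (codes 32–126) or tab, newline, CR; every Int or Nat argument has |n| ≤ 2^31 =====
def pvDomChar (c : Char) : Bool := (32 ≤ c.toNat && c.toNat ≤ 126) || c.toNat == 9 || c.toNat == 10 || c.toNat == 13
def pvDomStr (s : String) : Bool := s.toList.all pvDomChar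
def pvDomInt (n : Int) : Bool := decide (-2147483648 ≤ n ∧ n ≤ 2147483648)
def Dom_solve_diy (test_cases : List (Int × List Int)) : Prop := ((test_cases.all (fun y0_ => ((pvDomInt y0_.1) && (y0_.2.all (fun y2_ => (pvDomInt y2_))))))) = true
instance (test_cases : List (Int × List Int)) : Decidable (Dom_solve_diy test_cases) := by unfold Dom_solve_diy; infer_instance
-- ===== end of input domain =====

-- B replaces A's per-case Counter + filter + sort by one linear pass over arr that tracks
-- the min and max of the values seen at least twice (objective: alternative — no sort, same measured cost).

-- shared output formatting: both Pythons build the same f-string "{x1} {x1} {x1} {x2} {x2} {x1} {x2} {x2}"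
def pvFmt (x1 x2 : Int) : String :=
  PySem.Int.toStr x1 ++ " " ++ PySem.Int.toStr x1 ++ " " ++ PySem.Int.toStr x1 ++ " " ++
  PySem.Int.toStr x2 ++ " " ++ PySem.Int.toStr x2 ++ " " ++ PySem.Int.toStr x1 ++ " " ++
  PySem.Int.toStr x2 ++ " " ++ PySem.Int.toStr x2

-- ===== PORT A =====
def solve_diy (test_cases : List (Int × List Int)) : List String :=
  test_cases.foldl (fun results tc =>
    let arr := tc.2
    let count := PySem.Dict.counter arr
    let candidates := count.items.foldl
      (fun cs p => if 2 ≤ p.2 then cs ++ [p.1] else cs) ([] : List Int)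
    let candidates := PySem.List.sorted candidates (fun x => x) false
    if candidates.length < 2 then results ++ ["NO"]
    else
      -- candidates[0] / candidates[-1]; both indices are in range in this branch (length ≥ 2)
      let x1 := (PySem.List.pyGet? candidates 0).getD 0
      let x2 := (PySem.List.pyGet? candidates (-1)).getD 0
      results ++ ["YES", pvFmt x1 x2]) []

-- ===== PORT B =====
-- one step of B's inner loop over arr; state = (seen, dup, lo, hi)
def pvStep (st : PySem.Set Int × PySem.Set Int × Option Int × Option Int) (v : Int) :
    PySem.Set Int × PySem.Set Int × Option Int × Option Int :=
  let (seen, dup, lo, hi) := st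
  if PySem.Set.contains seen v then
    if PySem.Set.contains dup v then (seen, dup, lo, hi)
    else (seen, PySem.Set.add dup v,
          some (match lo with | none => v | some m => if v < m then v else m),
          some (match hi with | none => v | some m => if m < v then v else m))
  else (PySem.Set.add seen v, dup, lo, hi)

def solve_diy_alt (test_cases : List (Int × List Int)) : List String :=
  test_cases.foldl (fun results tc =>
    let st := tc.2.foldl pvStep (PySem.Set.empty, PySem.Set.empty, none, none)
    if PySem.Set.len st.2.1 < 2 then results ++ ["NO"]
    else results ++ ["YES", pvFmt (st.2.2.1.getD 0) (st.2.2.2.getD 0)]) []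

-- ===== PRECONDITION & SPEC =====
def Spec_solve_diy (test_cases : List (Int × List Int)) (out : List String) : Prop := out = solve_diy_alt test_cases
instance (test_cases : List (Int × List Int)) (out : List String) : Decidable (Spec_solve_diy test_cases out) := by unfold Spec_solve_diy; infer_instance

-- ===== CLAIM (what is proved, stated in full; the proofs are below) =====
def Claim_equal_solve_diy : Prop := ∀ (test_cases : List (Int × List Int)), Dom_solve_diy test_cases → Spec_solve_diy test_cases (solve_diy test_cases)

-- ===== LEMMAS AND PROOFS =====

-- invariant of B's inner loop after processing the prefix p of arr:
-- seen = set(p), dup = the distinct duplicated values of p, lo/hi their running min/max (none iff dup empty)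
def pvInv (p : List Int) (st : PySem.Set Int × PySem.Set Int × Option Int × Option Int) : Prop :=
  st.1 = PySem.Set.ofList p ∧
  st.2.1.Nodup ∧
  (∀ v, v ∈ st.2.1 ↔ 2 ≤ p.count v) ∧
  (st.2.2.1 = none → st.2.1 = []) ∧
  (∀ m, st.2.2.1 = some m → m ∈ st.2.1 ∧ ∀ x ∈ st.2.1, m ≤ x) ∧
  (st.2.2.2 = none → st.2.1 = []) ∧
  (∀ m, st.2.2.2 = some m → m ∈ st.2.1 ∧ ∀ x ∈ st.2.1, x ≤ m)


theorem pvCount_append_self (p : List Int) (v : Int) :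
    (p ++ [v]).count v = p.count v + 1 := by
  simp [List.count_append]

theorem pvCount_append_ne (p : List Int) (v x : Int) (hx : x ≠ v) :
    (p ++ [v]).count x = p.count x := by
  simp [List.count_append, Ne.symm hx]

theorem pvOfList_append (p : List Int) (v : Int) :
    PySem.Set.ofList (p ++ [v]) = PySem.Set.add (PySem.Set.ofList p) v := by
  simp [PySem.Set.ofList_eq_foldl]

theorem pvStep_inv (p : List Int) (st : PySem.Set Int × PySem.Set Int × Option Int × Option Int)
    (v : Int) (h : pvInv p st) : pvInv (p ++ [v]) (pvStep st v) := by
  obtain ⟨seen, dup, lo, hi⟩ := st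
  obtain ⟨hseen, hnd, hmem, hlon, hlo, hhin, hhi⟩ := h
  simp only [pvInv] at *
  by_cases hs : PySem.Set.contains seen v = true
  · have hvp : v ∈ p := by
      have : v ∈ seen := (PySem.Set.contains_iff seen v).mp hs
      rw [hseen] at this; exact (PySem.Set.mem_ofList p v).mp this
    have hseen' : PySem.Set.add seen v = seen := by
      simp [PySem.Set.add, (PySem.Set.contains_iff seen v).mp hs]
    have hof : PySem.Set.ofList (p ++ [v]) = seen := by
      rw [pvOfList_append, hseen, ← hseen, hseen']
    by_cases hd : PySem.Set.contains dup v = true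
    · have hvd : v ∈ dup := (PySem.Set.contains_iff dup v).mp hd
      simp only [pvStep, hs, hd, if_true]
      refine ⟨hof.symm, hnd, ?_, hlon, ?_, hhin, ?_⟩
      · intro x
        by_cases hx : x = v
        · subst hx
          have h2 : 2 ≤ p.count x := (hmem x).mp hvd
          rw [pvCount_append_self]
          constructor
          · intro _; omega
          · intro _; exact hvd
        · rw [pvCount_append_ne p v x hx]; exact hmem x
      · intro m hm; exact hlo m hm
      · intro m hm; exact hhi m hm
    · have hvd : v ∉ dup := fun hv => hd ((PySem.Set.contains_iff dup v).mpr hv)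
      have hc1 : ¬ 2 ≤ p.count v := fun h2 => hvd ((hmem v).mpr h2)
      have hdup' : PySem.Set.add dup v = dup ++ [v] := by
        simp [PySem.Set.add, hvd]
      simp only [pvStep, hs, hd, if_true, if_false, Bool.false_eq_true]
      refine ⟨hof.symm, ?_, ?_, ?_, ?_, ?_, ?_⟩
      · rw [hdup']; exact List.Nodup.append hnd (List.nodup_singleton v) (by simpa using hvd)
      · intro x
        rw [hdup']
        by_cases hx : x = v
        · subst hx
          have hc : 1 ≤ p.count x := List.one_le_count_iff.mpr hvp
          rw [pvCount_append_self]
          simp only [List.mem_append, List.mem_singleton]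
          constructor
          · intro _; omega
          · intro _; exact Or.inr trivial
        · rw [pvCount_append_ne p v x hx]
          simp only [List.mem_append, List.mem_singleton, hx, or_false]
          exact hmem x
      · intro hn; cases hn
      · intro m hm
        rw [hdup']
        cases lo with
        | none =>
            have hde : dup = [] := hlon rfl
            simp only [Option.some.injEq] at hm
            subst hde
            simp at hm ⊢
            omega
        | some m0 =>
            obtain ⟨hm0d, hm0min⟩ := hlo m0 rfl
            simp only [Option.some.injEq] at hm
            by_cases hlt : v < m0
            · simp only [if_pos hlt] at hm; subst hm
              refine ⟨by simp, ?_⟩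
              intro x hx
              rcases List.mem_append.mp hx with hx | hx
              · exact le_of_lt (lt_of_lt_of_le hlt (hm0min x hx))
              · simp at hx; omega
            · simp only [if_neg hlt] at hm; subst hm
              refine ⟨by simp [hm0d], ?_⟩
              intro x hx
              rcases List.mem_append.mp hx with hx | hx
              · exact hm0min x hx
              · simp at hx; omega
      · intro hn; cases hn
      · intro m hm
        rw [hdup']
        cases hi with
        | none =>
            have hde : dup = [] := hhin rfl
            simp only [Option.some.injEq] at hm
            subst hde
            simp at hm ⊢
            omega
        | some m0 =>
            obtain ⟨hm0d, hm0max⟩ := hhi m0 rfl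
            simp only [Option.some.injEq] at hm
            by_cases hlt : m0 < v
            · simp only [if_pos hlt] at hm; subst hm
              refine ⟨by simp, ?_⟩
              intro x hx
              rcases List.mem_append.mp hx with hx | hx
              · exact le_of_lt (lt_of_le_of_lt (hm0max x hx) hlt)
              · simp at hx; omega
            · simp only [if_neg hlt] at hm; subst hm
              refine ⟨by simp [hm0d], ?_⟩
              intro x hx
              rcases List.mem_append.mp hx with hx | hx
              · exact hm0max x hx
              · simp at hx; omega
  · have hvp : v ∉ p := by
      intro hv
      exact hs ((PySem.Set.contains_iff seen v).mpr (by rw [hseen]; exact (PySem.Set.mem_ofList p v).mpr hv))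
    have hc0 : p.count v = 0 := List.count_eq_zero.mpr hvp
    simp only [pvStep, hs, if_false, Bool.false_eq_true]
    refine ⟨?_, hnd, ?_, hlon, hlo, hhin, hhi⟩
    · rw [pvOfList_append, hseen]
    · intro x
      by_cases hx : x = v
      · subst hx
        rw [pvCount_append_self, hmem x, hc0]
        omega
      · rw [pvCount_append_ne p v x hx]; exact hmem x

theorem pvFold_inv (l p : List Int) (st : PySem.Set Int × PySem.Set Int × Option Int × Option Int)
    (h : pvInv p st) : pvInv (p ++ l) (l.foldl pvStep st) := by
  induction l generalizing p st with
  | nil => simpa using h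
  | cons x xs ih =>
      have := ih (p ++ [x]) (pvStep st x) (pvStep_inv p st x h)
      simpa using this

theorem pvInv_arr (arr : List Int) : pvInv arr (arr.foldl pvStep (PySem.Set.empty, PySem.Set.empty, none, none)) := by
  have h0 : pvInv [] ((PySem.Set.empty, PySem.Set.empty, none, none) :
      PySem.Set Int × PySem.Set Int × Option Int × Option Int) := by
    refine ⟨rfl, by simp [PySem.Set.empty], ?_, ?_, ?_, ?_, ?_⟩ <;> simp [PySem.Set.empty]
  simpa using pvFold_inv arr [] _ h0

-- A's candidate list (before sorting) = the distinct values of arr with ≥ 2 occurrences, in first-occurrence order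
theorem pvCands_eq (arr : List Int) :
    ((PySem.Dict.counter arr).items.foldl (fun cs p => if 2 ≤ p.2 then cs ++ [p.1] else cs) ([] : List Int))
      = (PySem.Set.ofList arr).filter (fun k => decide (2 ≤ arr.count k)) := by
  have h := PySem.List.foldl_append_if (fun p : Int × Int => decide (2 ≤ p.2)) (fun p => p.1)
    (PySem.Dict.counter arr).items ([] : List Int)
  simp only [decide_eq_true_eq] at h
  rw [h, PySem.Dict.items_counter, List.filter_map]
  simp [Function.comp_def, ]

theorem pvGet_zero (xs : List Int) (h : xs ≠ []) : (PySem.List.pyGet? xs 0).getD 0 = xs.headI := by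
  cases xs with
  | nil => simp at h
  | cons a t => simp [PySem.List.pyGet?, PySem.List.pyIdx?]

theorem pvGet_neg_one (xs : List Int) (h : 0 < xs.length) :
    PySem.List.pyGet? xs (-1) = xs[xs.length - 1]? := by
  have h1 : ¬ (0:Int) ≤ -1 := by norm_num
  have h2 : -(xs.length:Int) ≤ -1 := by omega
  simp only [PySem.List.pyGet?, PySem.List.pyIdx?, if_neg h1, if_pos h2]
  norm_num

-- per-test-case agreement of the two loop bodies
theorem pvBody_eq (results : List String) (tc : Int × List Int) :
    (let arr := tc.2
     let count := PySem.Dict.counter arr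
     let candidates := count.items.foldl
       (fun cs p => if 2 ≤ p.2 then cs ++ [p.1] else cs) ([] : List Int)
     let candidates := PySem.List.sorted candidates (fun x => x) false
     if candidates.length < 2 then results ++ ["NO"]
     else
       let x1 := (PySem.List.pyGet? candidates 0).getD 0
       let x2 := (PySem.List.pyGet? candidates (-1)).getD 0
       results ++ ["YES", pvFmt x1 x2]) =
    (let st := tc.2.foldl pvStep (PySem.Set.empty, PySem.Set.empty, none, none)
     if PySem.Set.len st.2.1 < 2 then results ++ ["NO"]
     else results ++ ["YES", pvFmt (st.2.2.1.getD 0) (st.2.2.2.getD 0)]) := by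
  obtain ⟨n, arr⟩ := tc
  simp only [pvCands_eq]
  obtain ⟨hseen, hndd, hmemd, hlon, hlo, hhin, hhi⟩ := pvInv_arr arr
  set st := arr.foldl pvStep (PySem.Set.empty, PySem.Set.empty, none, none) with hst
  set cands := (PySem.Set.ofList arr).filter (fun k => decide (2 ≤ arr.count k)) with hcands
  set c := PySem.List.sorted cands (fun x => x) false with hc0
  have hndc : cands.Nodup := (PySem.Set.nodup_ofList arr).filter _
  have hmemc : ∀ x, x ∈ cands ↔ 2 ≤ arr.count x := by
    intro x
    rw [hcands, List.mem_filter, PySem.Set.mem_ofList]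
    constructor
    · rintro ⟨_, hx⟩; simpa using hx
    · intro hx
      exact ⟨List.count_pos_iff.mp (by omega), by simpa using hx⟩
  have hperm : st.2.1.Perm cands :=
    (List.perm_ext_iff_of_nodup hndd hndc).mpr (fun a => by rw [hmemd a, hmemc a])
  have hlen : c.length = st.2.1.length := by
    rw [hc0, PySem.List.length_sorted]; exact hperm.length_eq.symm
  have hlenB : PySem.Set.len st.2.1 = (st.2.1.length : Int) := rfl
  by_cases hsmall : c.length < 2
  · rw [if_pos hsmall, if_pos (by rw [hlenB]; omega)]
  · rw [if_neg hsmall, if_neg (by rw [hlenB]; omega)]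
    have hcne : c ≠ [] := by
      intro h; rw [h] at hsmall; simp at hsmall
    -- x1 = lo
    have hx1 : (PySem.List.pyGet? c 0).getD 0 = st.2.2.1.getD 0 := by
      cases hcc : c with
      | nil => exact absurd hcc hcne
      | cons m t =>
        have hmin : ∀ y ∈ cands, m ≤ y := PySem.List.key_head_sorted_le cands (fun x => x) (hc0 ▸ hcc)
        cases hlov : st.2.2.1 with
        | none =>
            exfalso
            have he : st.2.1 = [] := hlon hlov
            rw [he] at hlen
            simp only [List.length_nil] at hlen
            omega
        | some l =>
            obtain ⟨hld, hlmin⟩ := hlo l hlov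
            have hlm : m = l := by
              have h1 : m ≤ l := hmin l ((hmemc l).mpr ((hmemd l).mp hld))
              have h2 : l ≤ m := by
                apply hlmin
                apply (hmemd m).mpr
                apply (hmemc m).mp
                rw [← PySem.List.mem_sorted cands (fun x => x) false, ← hc0, hcc]
                simp
              omega
            rw [pvGet_zero (m :: t) (by simp)]
            simpa using hlm
    -- x2 = hi
    have hx2 : (PySem.List.pyGet? c (-1)).getD 0 = st.2.2.2.getD 0 := by
      have hpos : 0 < c.length := by omega
      have hlt : c.length - 1 < c.length := by omega
      rw [pvGet_neg_one c hpos]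
      cases hhiv : st.2.2.2 with
      | none =>
          exfalso
          have he : st.2.1 = [] := hhin hhiv
          rw [he] at hlen
          simp only [List.length_nil] at hlen
          omega
      | some hgh =>
          obtain ⟨hhd, hhmax⟩ := hhi hgh hhiv
          rw [List.getElem?_eq_getElem hlt, ← List.getD_eq_getElem c 0 hlt]
          set z := List.getD c (c.length - 1) 0 with hzdef
          have hzc : z ∈ c := by
            rw [hzdef, List.getD_eq_getElem c 0 hlt]
            exact List.getElem_mem hlt
          have hpw : c.Pairwise (· ≤ ·) := by
            rw [hc0]
            simpa using PySem.List.sorted_pairwise cands (fun x => x)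
          have hmax : ∀ y ∈ cands, y ≤ z := by
            intro y hy
            have hyc : y ∈ c := by rw [hc0, PySem.List.mem_sorted]; exact hy
            obtain ⟨i, hi, hiy⟩ := List.mem_iff_getElem.mp hyc
            rcases Nat.lt_or_ge i (c.length - 1) with hlt2 | hge
            · have hp := List.pairwise_iff_getElem.mp hpw i (c.length - 1) hi hlt hlt2
              rw [← hiy, hzdef, List.getD_eq_getElem c 0 hlt]
              exact hp
            · have hieq : i = c.length - 1 := by omega
              subst hieq
              rw [← hiy, hzdef, List.getD_eq_getElem c 0 hlt]
          have heq : z = hgh := by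
            have h1 : hgh ≤ z := hmax hgh ((hmemc hgh).mpr ((hmemd hgh).mp hhd))
            have h2 : z ≤ hgh := by
              apply hhmax
              apply (hmemd _).mpr
              apply (hmemc _).mp
              rw [← PySem.List.mem_sorted cands (fun x => x) false, ← hc0]
              exact hzc
            omega
          simp [heq]
    rw [hx1, hx2]

-- ===== VERDICT (by name: the statement is the Claim_ definition above) =====
theorem solve_diy_spec : Claim_equal_solve_diy := by
  intro tcs _
  unfold Spec_solve_diy solve_diy solve_diy_alt
  exact List.foldl_ext _ _ [] (fun res tc _ => pvBody_eq res tc)
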